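-- pv_equiv track=rewrite | github.com/candyer/codechef | January Cook-Off 2020/EXAMCHT/EXAMCHT.py | solve
-- ===== SOURCE A (Python) =====
-- from math import sqrt
--
-- def solve(a, b):
-- 	diff = abs(a - b)
-- 	count = 0
-- 	for i in range(1, int(sqrt(diff) + 1)):
-- 		if diff % i == 0:
-- 			if i * i != diff:
-- 				count += 2
-- 			else:
-- 				count += 1
-- 	return count
-- ===== SOURCE B (Python) =====
-- def solve(a, b):
--     n = abs(a - b)
--     if n == 0:
--         return 0
--     total = 1
--     f = 2
--     while f * f <= n:
--         e = 0
--         while n % f == 0: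
--             n //= f
--             e += 1
--         total *= e + 1
--         f += 1
--     if n > 1:
--         total *= 2
--     return total
-- ===== Notes on version B (the rewrite author's own statement) =====
-- stated objective: alternative
-- what changed: A counts divisor pairs i,n/i by scanning all i up to sqrt(|a-b|); B factorizes |a-b| by trial division, maintaining prime exponents and returning the product of (exponent+1).
import Mathlib
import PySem

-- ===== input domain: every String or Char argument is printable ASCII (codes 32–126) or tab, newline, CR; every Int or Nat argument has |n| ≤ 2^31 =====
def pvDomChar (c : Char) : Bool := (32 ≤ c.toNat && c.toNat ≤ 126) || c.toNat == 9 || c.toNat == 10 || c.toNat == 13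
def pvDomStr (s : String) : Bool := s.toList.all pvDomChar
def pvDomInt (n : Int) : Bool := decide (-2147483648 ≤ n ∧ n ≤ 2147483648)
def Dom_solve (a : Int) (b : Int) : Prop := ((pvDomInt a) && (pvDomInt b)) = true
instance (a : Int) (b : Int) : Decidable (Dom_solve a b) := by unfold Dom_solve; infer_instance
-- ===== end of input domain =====

-- B replaces A's divisor-pair counting up to sqrt by trial-division factorization, returning the product of (exponent+1); same asymptotic cost, different algorithm.

-- ===== PORT A =====
def solve (a : Int) (b : Int) : Int :=
  let diff := |a - b|
  -- int(sqrt(diff) + 1): for 0 ≤ diff ≤ 2^32 Python's float sqrt is exact enough that this equals Nat.sqrt diff + 1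
  (PySem.List.pyRange 1 ((Nat.sqrt diff.toNat : Int) + 1) 1).foldl
    (fun count i =>
      if PySem.Int.mod diff i == 0 then
        if i * i != diff then count + 2 else count + 1
      else count) 0

-- ===== PORT B =====
-- inner loop 'while n % f == 0: n //= f; e += 1'; the guards '0 < n', '2 ≤ f' only ensure
-- termination (they always hold at the call sites, where 0 < n and f ≥ 2)
def pvDivOut (n : Nat) (f : Nat) (e : Nat) : Nat × Nat :=
  if h : n % f = 0 ∧ 0 < n ∧ 2 ≤ f then pvDivOut (n / f) f (e + 1) else (n, e)
termination_by n
decreasing_by exact Nat.div_lt_self h.2.1 (by omega)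

-- termination helper for pvFactLoop, cited in its decreasing_by
theorem pvDivOut_fst_le (n f e : Nat) : (pvDivOut n f e).1 ≤ n := by
  fun_induction pvDivOut n f e with
  | case1 n e h ih => exact le_trans ih (Nat.div_le_self _ _)
  | case2 n e h => exact le_refl _

-- outer loop 'while f * f <= n: …; f += 1'; returns (total, final n); guard '2 ≤ f' is for termination only
def pvFactLoop (total : Nat) (f : Nat) (n : Nat) : Nat × Nat :=
  if h : f * f ≤ n ∧ 2 ≤ f then
    let p := pvDivOut n f 0
    pvFactLoop (total * (p.2 + 1)) (f + 1) p.1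
  else (total, n)
termination_by n + 2 - f
decreasing_by
  have h1 := pvDivOut_fst_le n f 0
  have h2 : f * 1 ≤ f * f := Nat.mul_le_mul_left f (by omega)
  omega

def solve_alt (a : Int) (b : Int) : Int :=
  let n := (a - b).natAbs
  if n = 0 then 0
  else
    let r := pvFactLoop 1 2 n
    ((if 1 < r.2 then r.1 * 2 else r.1 : Nat) : Int)

-- ===== PRECONDITION & SPEC =====
def Spec_solve (a : Int) (b : Int) (out : Int) : Prop := out = solve_alt a b
instance (a : Int) (b : Int) (out : Int) : Decidable (Spec_solve a b out) := by unfold Spec_solve; infer_instance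

-- ===== CLAIM (what is proved, stated in full; the proofs are below) =====
def Claim_equal_solve : Prop := ∀ (a : Int) (b : Int), Dom_solve a b → Spec_solve a b (solve a b)

-- ===== LEMMAS AND PROOFS =====

-- A's loop counts 1 for a square root divisor, 2 for any other divisor below the square root:
-- that sum is the divisor count.
theorem sum_sqrt_divisors (n : Nat) :
    (∑ j ∈ Finset.Ico 1 (Nat.sqrt n + 1),
      (if j ∣ n then (if j * j ≠ n then (2 : Nat) else 1) else 0)) = n.divisors.card := by
  rcases Nat.eq_zero_or_pos n with rfl | hn
  · simp
  · rw [← Finset.sum_filter]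
    have hset : (Finset.Ico 1 (Nat.sqrt n + 1)).filter (· ∣ n)
        = n.divisors.filter (fun d => d * d ≤ n) := by
      ext a
      simp only [Finset.mem_filter, Finset.mem_Ico, Nat.mem_divisors]
      constructor
      · rintro ⟨⟨h1, h2⟩, hd⟩
        exact ⟨⟨hd, by omega⟩, Nat.le_sqrt.mp (by omega)⟩
      · rintro ⟨⟨hd, _⟩, hsq⟩
        have ha1 := Nat.pos_of_dvd_of_pos hd hn
        have ha2 := Nat.le_sqrt.mpr hsq
        exact ⟨⟨by omega, by omega⟩, hd⟩
    rw [hset]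
    have hsum : ∑ d ∈ n.divisors.filter (fun d => d * d ≤ n),
          (if d * d ≠ n then (2 : Nat) else 1)
        = ∑ d ∈ n.divisors.filter (fun d => d * d ≤ n),
          (1 + if d * d < n then 1 else 0) := by
      refine Finset.sum_congr rfl fun d hd => ?_
      have hle : d * d ≤ n := (Finset.mem_filter.mp hd).2
      by_cases hlt : d * d < n
      · rw [if_pos (by omega), if_pos hlt]
      · rw [if_neg (by omega), if_neg hlt]
    rw [hsum, Finset.sum_add_distrib, Finset.sum_const, smul_eq_mul, mul_one,
      ← Finset.card_filter, Finset.filter_filter]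
    have hff : n.divisors.filter (fun d => d * d ≤ n ∧ d * d < n)
        = n.divisors.filter (fun d => d * d < n) := by
      refine Finset.filter_congr fun d _ => ?_
      exact ⟨fun h => h.2, fun h => ⟨le_of_lt h, h⟩⟩
    rw [hff]
    have hbij : (n.divisors.filter (fun d => d * d < n)).card
        = (n.divisors.filter (fun d => ¬ d * d ≤ n)).card := by
      refine Finset.card_nbij' (fun d => n / d) (fun d => n / d) ?_ ?_ ?_ ?_
      · intro d hd
        simp only [Finset.coe_filter, Set.mem_setOf_eq, Nat.mem_divisors] at hd ⊢
        obtain ⟨⟨⟨c, hc⟩, _⟩, hlt⟩ := hd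
        have hd0 : 0 < d := Nat.pos_of_dvd_of_pos ⟨c, hc⟩ hn
        have hc0 : 0 < c := by
          rcases Nat.eq_zero_or_pos c with rfl | h
          · omega
          · exact h
        have hcval : n / d = c := by rw [hc]; exact Nat.mul_div_cancel_left c hd0
        have hdc : d < c := by
          have := Nat.lt_of_mul_lt_mul_left (a := d) (by omega : d * d < d * c)
          exact this
        have hcc : d * c < c * c := (Nat.mul_lt_mul_right hc0).mpr hdc
        rw [hcval]
        exact ⟨⟨⟨d, by rw [hc]; ring⟩, by omega⟩, by omega⟩
      · intro d hd
        simp only [Finset.coe_filter, Set.mem_setOf_eq, Nat.mem_divisors] at hd ⊢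
        obtain ⟨⟨⟨c, hc⟩, _⟩, hgt⟩ := hd
        have hd0 : 0 < d := Nat.pos_of_dvd_of_pos ⟨c, hc⟩ hn
        have hc0 : 0 < c := by
          rcases Nat.eq_zero_or_pos c with rfl | h
          · omega
          · exact h
        have hcval : n / d = c := by rw [hc]; exact Nat.mul_div_cancel_left c hd0
        have hcd : c < d := by
          by_contra hcon
          have : d * d ≤ d * c := Nat.mul_le_mul_left d (by omega)
          omega
        have hcc : c * c < c * d := (Nat.mul_lt_mul_left hc0).mpr hcd
        rw [hcval]
        exact ⟨⟨⟨d, by rw [hc]; ring⟩, by omega⟩, by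
          have : c * d = n := by rw [hc]; ring
          omega⟩
      · intro d hd
        simp only [Finset.coe_filter, Set.mem_setOf_eq, Nat.mem_divisors] at hd
        exact Nat.div_div_self hd.1.1 (by omega)
      · intro d hd
        simp only [Finset.coe_filter, Set.mem_setOf_eq, Nat.mem_divisors] at hd
        exact Nat.div_div_self hd.1.1 (by omega)
    rw [hbij, Finset.card_filter_add_card_filter_not]

theorem list_range_map_sum (n : Nat) (f : Nat → Int) :
    ((List.range n).map f).sum = ∑ k ∈ Finset.range n, f k := by
  induction n with
  | zero => simp
  | succ m ih =>
    rw [List.range_succ, List.map_append, List.sum_append, Finset.sum_range_succ, ih]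
    simp

-- the body of A's loop, for diff = ↑N
theorem solveA_body (N : Nat) :
    ((PySem.List.pyRange 1 ((Nat.sqrt N : Int) + 1) 1).foldl
      (fun count i =>
        if PySem.Int.mod (N : Int) i == 0 then
          if i * i != (N : Int) then count + 2 else count + 1
        else count) 0) = (N.divisors.card : Int) := by
  have hfun : (fun (count : Int) (i : Int) =>
        if PySem.Int.mod (N : Int) i == 0 then
          if i * i != (N : Int) then count + 2 else count + 1
        else count)
      = fun (count : Int) (i : Int) => count +
          (if PySem.Int.mod (N : Int) i == 0 then
            (if i * i != (N : Int) then (2 : Int) else 1) else 0) := by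
    funext c i
    split_ifs <;> ring
  rw [hfun, PySem.List.foldl_add, zero_add, PySem.List.pyRange_one]
  have ht : (((Nat.sqrt N : Int) + 1) - 1).toNat = Nat.sqrt N := by omega
  rw [ht, List.map_map, list_range_map_sum]
  have hpoint : ∀ k : Nat,
      (if PySem.Int.mod (N : Int) (1 + (k : Int)) == 0 then
        (if (1 + (k : Int)) * (1 + (k : Int)) != (N : Int) then (2 : Int) else 1) else 0)
      = (((if (1 + k) ∣ N then (if (1 + k) * (1 + k) ≠ N then (2 : Nat) else 1) else 0) : Nat) : Int) := by
    intro k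
    have hc : (1 + (k : Int)) = ((1 + k : Nat) : Int) := by push_cast; ring
    rw [hc, PySem.Int.mod_natCast]
    by_cases h1 : (1 + k) ∣ N
    · have hm : N % (1 + k) = 0 := Nat.mod_eq_zero_of_dvd h1
      by_cases h2 : (1 + k) * (1 + k) = N
      · simp [hm, h1, h2]
        exact_mod_cast h2
      · have hb : ((((1 + k : Nat) : Int)) * (((1 + k : Nat) : Int)) != (N : Int)) = true := by
          simp only [bne_iff_ne, Ne, ← Nat.cast_mul, Int.natCast_inj]
          exact h2
        simp [hm, h1, h2]
        intro hcc
        exact h2 (by exact_mod_cast hcc)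
    · have hm : N % (1 + k) ≠ 0 := fun hc2 => h1 (Nat.dvd_of_mod_eq_zero hc2)
      have hb : (((N % (1 + k) : Nat) : Int) == (0 : Int)) = false := by
        rw [beq_eq_false_iff_ne]
        exact fun hz => hm (by exact_mod_cast hz)
      simp only [hb, if_false, Bool.false_eq_true]
      simp [h1]
  calc (∑ k ∈ Finset.range (Nat.sqrt N), (fun k : Nat =>
          (if PySem.Int.mod (N : Int) (1 + (k : Int)) == 0 then
            (if (1 + (k : Int)) * (1 + (k : Int)) != (N : Int) then (2 : Int) else 1) else 0)) k)
      = ∑ k ∈ Finset.range (Nat.sqrt N),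
          (((if (1 + k) ∣ N then (if (1 + k) * (1 + k) ≠ N then (2 : Nat) else 1) else 0) : Nat) : Int) :=
        Finset.sum_congr rfl fun k _ => hpoint k
    _ = ((∑ k ∈ Finset.range (Nat.sqrt N),
          (if (1 + k) ∣ N then (if (1 + k) * (1 + k) ≠ N then (2 : Nat) else 1) else 0) : Nat) : Int) := by
        push_cast; ring
    _ = (N.divisors.card : Int) := by
        have h := sum_sqrt_divisors N
        rw [Finset.sum_Ico_eq_sum_range] at h
        simp only [Nat.add_sub_cancel] at h
        exact_mod_cast congrArg (Nat.cast : Nat → Int) h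

theorem solve_eq_card (a b : Int) : solve a b = ((a - b).natAbs.divisors.card : Int) := by
  simp only [solve, Int.abs_eq_natAbs, Int.toNat_natCast]
  exact solveA_body (a - b).natAbs

-- pvDivOut n f 0 returns (m, e) with n = f^e * m and f ∤ m
theorem pvDivOut_spec (n f e0 : Nat) : 0 < n → 2 ≤ f →
    ∃ k, (pvDivOut n f e0).2 = e0 + k ∧ n = f ^ k * (pvDivOut n f e0).1 ∧
      ¬ f ∣ (pvDivOut n f e0).1 ∧ 0 < (pvDivOut n f e0).1 := by
  fun_induction pvDivOut n f e0 with
  | case1 n e h ih =>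
    intro hn hf
    have hdvd : _ ∣ _ := Nat.dvd_of_mod_eq_zero h.1
    have hpos : 0 < _ / _ := Nat.div_pos (Nat.le_of_dvd hn hdvd) (by omega)
    obtain ⟨k, hk, heq, hnd, hp⟩ := ih hpos hf
    refine ⟨k + 1, by omega, ?_, hnd, hp⟩
    have hsplit : n = f * (n / f) := (Nat.mul_div_cancel' hdvd).symm
    conv_lhs => rw [hsplit, heq]
    ring
  | case2 n e h =>
    intro hn hf
    refine ⟨0, by omega, by simp, ?_, hn⟩
    intro hdvd
    exact h ⟨Nat.mod_eq_zero_of_dvd hdvd, hn, hf⟩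

-- a prime power times a coprime factor multiplies the divisor count by (exponent + 1)
theorem card_divisors_pow_mul {f e m : Nat} (hfp : Nat.Prime f) (hnd : ¬ f ∣ m) :
    (f ^ e * m).divisors.card = (e + 1) * m.divisors.card := by
  have hcop : (f ^ e).Coprime m :=
    Nat.Coprime.pow_left e ((Nat.Prime.coprime_iff_not_dvd hfp).mpr hnd)
  rw [Nat.Coprime.card_divisors_mul hcop, Nat.divisors_prime_pow hfp, Finset.card_map,
    Finset.card_range]

theorem pvFactLoop_eq (total f n : Nat) : 0 < n → 2 ≤ f →
    (∀ m, m ∣ n → m < f → m = 1) →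
    (if 1 < (pvFactLoop total f n).2 then (pvFactLoop total f n).1 * 2
      else (pvFactLoop total f n).1) = total * n.divisors.card := by
  fun_induction pvFactLoop total f n with
  | case1 total f n h p ih =>
    intro hn hf hnd
    have hp : p = pvDivOut n f 0 := rfl
    obtain ⟨e, he, heq, hndvd, hm⟩ := pvDivOut_spec n f 0 hn hf
    rw [← hp] at he heq hndvd hm
    have hmdvd : p.1 ∣ n := ⟨f ^ e, by rw [heq]; ring⟩
    have hnd' : ∀ q, q ∣ p.1 → q < f + 1 → q = 1 := by
      intro q hq hlt
      have hqn : q ∣ n := hq.trans hmdvd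
      rcases Nat.lt_or_ge q f with h' | h'
      · exact hnd q hqn h'
      · have hqf : q = f := by omega
        subst hqf
        exact absurd hq hndvd
    rw [ih hm (by omega) hnd']
    have hp2 : p.2 = e := by omega
    rcases Nat.eq_zero_or_pos e with he0 | hepos
    · rw [he0, pow_zero, one_mul] at heq
      rw [heq, hp2, he0]
      ring
    · have hfdvd : f ∣ n := by
        rw [heq]
        exact Dvd.dvd.mul_right (dvd_pow_self f (by omega)) _
      have hfp : f.Prime := by
        rw [Nat.prime_def]
        refine ⟨hf, fun u hu => ?_⟩
        have hun : u ∣ n := hu.trans hfdvd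
        rcases Nat.lt_or_ge u f with h' | h'
        · exact Or.inl (hnd u hun h')
        · have huf : u ≤ f := Nat.le_of_dvd (by omega) hu
          exact Or.inr (by omega)
      have hcard : n.divisors.card = (e + 1) * p.1.divisors.card := by
        conv_lhs => rw [heq]
        exact card_divisors_pow_mul hfp hndvd
      rw [hcard, hp2]
      ring
  | case2 total f n h =>
    intro hn hf hnd
    have hlt : n < f * f := by
      by_contra hc
      exact h ⟨by omega, hf⟩
    by_cases h1 : 1 < n
    · have hprime : n.Prime := by
        rw [Nat.prime_def]
        refine ⟨h1, fun m hm => ?_⟩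
        obtain ⟨c, hc⟩ := hm
        have hcdvd : c ∣ n := ⟨m, by rw [hc]; ring⟩
        by_cases hmf : m < f
        · exact Or.inl (hnd m ⟨c, hc⟩ hmf)
        · by_cases hcf : c < f
          · have hc1 : c = 1 := hnd c hcdvd hcf
            exact Or.inr (by rw [hc, hc1, mul_one])
          · exfalso
            have : f * f ≤ m * c := Nat.mul_le_mul (by omega) (by omega)
            omega
      simp only [if_pos h1]
      rw [Nat.Prime.divisors hprime, Finset.card_pair (by omega : (1 : ℕ) ≠ n)]
    · have hn1 : n = 1 := by omega
      subst hn1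
      simp [Nat.divisors_one]

theorem solve_alt_eq_card (a b : Int) : solve_alt a b = ((a - b).natAbs.divisors.card : Int) := by
  unfold solve_alt
  by_cases h0 : (a - b).natAbs = 0
  · simp [h0]
  · simp only [h0, if_false]
    have h := pvFactLoop_eq 1 2 (a - b).natAbs (by omega) (by omega)
      (fun m hm hlt => by
        have := Nat.pos_of_dvd_of_pos hm (by omega)
        omega)
    rw [one_mul] at h
    exact_mod_cast congrArg (Nat.cast : Nat → Int) h

-- ===== VERDICT (by name: the statement is the Claim_ definition above) =====
theorem solve_spec : Claim_equal_solve := by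
  intro a b _
  unfold Spec_solve
  rw [solve_eq_card, solve_alt_eq_card]
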